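-- pv_equiv track=rewrite | github.com/Jinitjain/flask-app | Analyze_Sentiment_Exhaustive.py | find_subsectors
-- ===== SOURCE A (Python) =====
-- def find_subsectors(organizations, cleaned_subsectors):
--     """Find subsectors in organization"""
--
--     organ_to_subsector = {}
--     for subsector in cleaned_subsectors:
--         for organization in organizations.keys():
--             for split_organization in organization.split(' '):
--                 if split_organization in subsector.split(' '):
--                     if split_organization not in organ_to_subsector:
--                         organ_to_subsector[split_organization] = list()
--                     organ_to_subsector[split_organization].append(subsector)
--     return organ_to_subsector
-- ===== SOURCE B (Python) =====
-- def find_subsectors(organizations, cleaned_subsectors):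
--     """Find subsectors in organization"""
--     # Precompute all organization words once, with multiplicity counts,
--     # then walk each subsector's word set against that counter.
--     counts = {}
--     for organization in organizations.keys():
--         for w in organization.split(' '):
--             counts[w] = counts.get(w, 0) + 1
--     organ_to_subsector = {}
--     for subsector in cleaned_subsectors:
--         subsector_words = set(subsector.split(' '))
--         for w, c in counts.items():
--             if w in subsector_words:
--                 organ_to_subsector[w] = organ_to_subsector.get(w, []) + [subsector] * c
--     return organ_to_subsector
-- ===== Notes on version B (the rewrite author's own statement) =====
-- stated objective: faster
-- what changed: B builds a word->count dictionary over all organization words once and then, per subsector, walks that counter against the subsector's word set appending c copies at a time, instead of A's triple nested loop that re-splits every organization and subsector string and scans the subsector word list for every organization word.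
import Mathlib
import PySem

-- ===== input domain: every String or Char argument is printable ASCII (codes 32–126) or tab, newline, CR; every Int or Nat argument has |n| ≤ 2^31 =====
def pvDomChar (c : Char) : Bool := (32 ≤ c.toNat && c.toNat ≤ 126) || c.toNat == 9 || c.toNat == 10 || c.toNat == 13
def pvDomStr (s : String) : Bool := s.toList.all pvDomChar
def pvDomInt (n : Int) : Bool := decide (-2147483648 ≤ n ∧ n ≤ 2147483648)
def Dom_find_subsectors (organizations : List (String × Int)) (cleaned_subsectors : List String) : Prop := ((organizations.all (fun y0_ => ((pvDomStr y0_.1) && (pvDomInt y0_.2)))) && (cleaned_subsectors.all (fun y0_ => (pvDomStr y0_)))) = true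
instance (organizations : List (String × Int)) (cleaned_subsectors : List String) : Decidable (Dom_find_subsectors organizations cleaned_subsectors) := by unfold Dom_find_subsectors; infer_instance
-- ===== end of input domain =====

-- B precomputes the organization-word counts once and walks each subsector's word set
-- against that counter, instead of A's triple loop that re-splits every string; objective: faster.

-- s.split(' '): PySem.Str.split? is none only for the empty separator, which " " is not.
def pySplitSpace (s : String) : List String := (PySem.Str.split? s " ").getD []

-- ===== PORT A =====
def find_subsectors (organizations : List (String × Int)) (cleaned_subsectors : List String) : List (String × List String) :=
  (cleaned_subsectors.foldl (fun organ_to_subsector subsector =>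
      (PySem.Dict.ofList organizations).keys.foldl (fun organ_to_subsector organization =>
        (pySplitSpace organization).foldl (fun organ_to_subsector split_organization =>
          if split_organization ∈ pySplitSpace subsector then
            let d := if organ_to_subsector.contains split_organization then organ_to_subsector
                     else organ_to_subsector.insert split_organization []
            d.modify split_organization [] (fun v => v ++ [subsector])
          else organ_to_subsector) organ_to_subsector) organ_to_subsector)
    (PySem.Dict.empty : PySem.Dict String (List String))).items

-- ===== PORT B =====
def find_subsectors_alt (organizations : List (String × Int)) (cleaned_subsectors : List String) : List (String × List String) :=
  let counts : PySem.Dict String Int :=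
    (PySem.Dict.ofList organizations).keys.foldl (fun counts organization =>
      (pySplitSpace organization).foldl (fun counts w =>
        counts.insert w (counts.getD w 0 + 1)) counts) PySem.Dict.empty
  (cleaned_subsectors.foldl (fun organ_to_subsector subsector =>
      let subsector_words : PySem.Set String := PySem.Set.ofList (pySplitSpace subsector)
      counts.items.foldl (fun organ_to_subsector wc =>
        if wc.1 ∈ subsector_words then
          organ_to_subsector.insert wc.1
            (organ_to_subsector.getD wc.1 [] ++ List.replicate wc.2.toNat subsector)
        else organ_to_subsector) organ_to_subsector)
    (PySem.Dict.empty : PySem.Dict String (List String))).items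

-- ===== PRECONDITION & SPEC =====
def Spec_find_subsectors (organizations : List (String × Int)) (cleaned_subsectors : List String) (out : List (String × List String)) : Prop := out = find_subsectors_alt organizations cleaned_subsectors
instance (organizations : List (String × Int)) (cleaned_subsectors : List String) (out : List (String × List String)) : Decidable (Spec_find_subsectors organizations cleaned_subsectors out) := by unfold Spec_find_subsectors; infer_instance

-- ===== CLAIM (what is proved, stated in full; the proofs are below) =====
def Claim_equal_find_subsectors : Prop := ∀ (organizations : List (String × Int)) (cleaned_subsectors : List String), Dom_find_subsectors organizations cleaned_subsectors → Spec_find_subsectors organizations cleaned_subsectors (find_subsectors organizations cleaned_subsectors)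

-- ===== LEMMAS AND PROOFS =====

-- A's loop body for one organization word (definitionally the lambda in the port of A)
def fsStepA (sub : String) (d : PySem.Dict String (List String)) (w : String) : PySem.Dict String (List String) :=
  if w ∈ pySplitSpace sub then
    let d' := if d.contains w then d else d.insert w []
    d'.modify w [] (fun v => v ++ [sub])
  else d

-- appending n copies of sub to the entry of w
def fsIns (sub w : String) (n : Nat) (d : PySem.Dict String (List String)) : PySem.Dict String (List String) :=
  d.insert w (d.getD w [] ++ List.replicate n sub)

theorem fsStepA_eq (sub : String) (d : PySem.Dict String (List String)) (w : String) :
    fsStepA sub d w = if w ∈ pySplitSpace sub then fsIns sub w 1 d else d := by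
  unfold fsStepA fsIns
  by_cases hP : w ∈ pySplitSpace sub
  · rw [if_pos hP, if_pos hP]
    by_cases hc : d.contains w = true
    · rw [if_pos hc]; rfl
    · have hc' : d.contains w = false := by revert hc; cases d.contains w <;> simp
      rw [if_neg (by simp [hc'])]
      show (d.insert w []).modify w [] (fun v => v ++ [sub]) = _
      rw [PySem.Dict.getD_of_not_contains d [] hc']
      unfold PySem.Dict.modify
      rw [PySem.Dict.getD_insert_self, PySem.Dict.insert_insert_self]
      simp
  · rw [if_neg hP, if_neg hP]

theorem fsContains_stepA (sub : String) (d : PySem.Dict String (List String)) (w x : String)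
    (h : d.contains x = true) : (fsStepA sub d w).contains x = true := by
  rw [fsStepA_eq]
  split
  · simp [fsIns, PySem.Dict.contains_insert, h]
  · exact h

theorem fsInsComm (d : PySem.Dict String (List String)) (v w : String) (a b : List String)
    (hw : d.contains w = true) (hne : v ≠ w) :
    (d.insert v a).insert w b = (d.insert w b).insert v a := by
  have hvw : (v == w) = false := by simp [hne]
  have h1 : (d.insert v a).contains w = true := by
    rw [PySem.Dict.contains_insert]; simp [hw]
  apply PySem.Dict.ext
  by_cases hv : d.contains v = true
  · have h2 : (d.insert w b).contains v = true := by
      rw [PySem.Dict.contains_insert]; simp [hv]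
    rw [PySem.Dict.items_insert_of_contains _ _ h1, PySem.Dict.items_insert_of_contains _ _ h2,
        PySem.Dict.items_insert_of_contains _ _ hv, PySem.Dict.items_insert_of_contains _ _ hw,
        List.map_map, List.map_map]
    apply List.map_congr_left
    intro p _
    by_cases hpv : p.1 = v
    · simp [Function.comp, hpv, hvw, hne]
    · by_cases hpw : p.1 = w <;> simp [Function.comp, hpv, hpw, hvw, Ne.symm hne, hne]
  · have hv' : d.contains v = false := by revert hv; cases d.contains v <;> simp
    have h2 : (d.insert w b).contains v = false := by
      rw [PySem.Dict.contains_insert]; simp [hv', hvw]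
    rw [PySem.Dict.items_insert_of_contains _ _ h1, PySem.Dict.items_insert_of_not_contains _ _ h2,
        PySem.Dict.items_insert_of_not_contains _ _ hv', PySem.Dict.items_insert_of_contains _ _ hw,
        List.map_append]
    simp only [List.map_cons, List.map_nil]
    rw [show (if (v == w) = true then (w, b) else (v, a)) = (v, a) from by rw [hvw]; simp]

theorem fsComm (sub : String) (d : PySem.Dict String (List String)) (v w : String)
    (hw : d.contains w = true) (hne : w ≠ v) :
    fsStepA sub (fsStepA sub d v) w = fsStepA sub (fsStepA sub d w) v := by
  by_cases hPw : w ∈ pySplitSpace sub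
  · by_cases hPv : v ∈ pySplitSpace sub
    · have hc2 : (fsStepA sub d v).contains w = true := fsContains_stepA sub d v w hw
      rw [fsStepA_eq sub d v, if_pos hPv, fsStepA_eq sub d w, if_pos hPw]
      rw [fsStepA_eq, if_pos hPw, fsStepA_eq, if_pos hPv]
      unfold fsIns
      rw [PySem.Dict.getD_insert_of_ne _ _ _ hne, PySem.Dict.getD_insert_of_ne _ _ _ (Ne.symm hne)]
      exact fsInsComm d v w _ _ hw (Ne.symm hne)
    · rw [fsStepA_eq sub d v, if_neg hPv]
      rw [fsStepA_eq sub (fsStepA sub d w) v, if_neg hPv]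
  · rw [fsStepA_eq sub (fsStepA sub d v) w, if_neg hPw, fsStepA_eq sub d w, if_neg hPw]

theorem fsContains_iter (sub : String) (w x : String) :
    ∀ (n : Nat) (d : PySem.Dict String (List String)), d.contains x = true →
      ((fun d => fsStepA sub d w)^[n] d).contains x = true := by
  intro n
  induction n with
  | zero => intro d h; exact h
  | succ n ih =>
    intro d h
    rw [Function.iterate_succ_apply']
    exact fsContains_stepA sub _ w x (ih d h)

theorem fsIterComm (sub : String) (v w : String) (hne : w ≠ v) :
    ∀ (n : Nat) (d : PySem.Dict String (List String)), d.contains w = true →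
      (fun d => fsStepA sub d w)^[n] (fsStepA sub d v)
        = fsStepA sub ((fun d => fsStepA sub d w)^[n] d) v := by
  intro n
  induction n with
  | zero => intro d _; rfl
  | succ n ih =>
    intro d h
    rw [Function.iterate_succ_apply', Function.iterate_succ_apply', ih d h]
    exact fsComm sub ((fun d => fsStepA sub d w)^[n] d) v w (fsContains_iter sub w w n d h) hne


theorem fsIterIns (sub w : String) (hP : w ∈ pySplitSpace sub) :
    ∀ (n : Nat) (d : PySem.Dict String (List String)),
      (fun d => fsStepA sub d w)^[n] (fsIns sub w 1 d) = fsIns sub w (n + 1) d := by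
  intro n
  induction n with
  | zero => simp
  | succ n ih =>
    intro d
    rw [Function.iterate_succ_apply', ih d]
    rw [fsStepA_eq, if_pos hP]
    unfold fsIns
    rw [PySem.Dict.getD_insert_self, PySem.Dict.insert_insert_self]
    rw [List.append_assoc, ← List.replicate_add]

theorem fsPull (sub w : String) :
    ∀ (l : List String) (d : PySem.Dict String (List String)), d.contains w = true →
      l.foldl (fsStepA sub) d
        = (l.filter (fun y => !(y == w))).foldl (fsStepA sub)
            ((fun d => fsStepA sub d w)^[l.count w] d) := by
  intro l
  induction l with
  | nil => intro d _; rfl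
  | cons v t ih =>
    intro d h
    by_cases hv : v = w
    · subst hv
      rw [List.foldl_cons, ih (fsStepA sub d v) (fsContains_stepA sub d v v h)]
      rw [List.count_cons_self, List.filter_cons]
      simp only [beq_self_eq_true, Bool.not_true, Bool.false_eq_true, if_false]
      rw [Function.iterate_succ_apply]
    · have hwv : w ≠ v := fun hh => hv hh.symm
      rw [List.foldl_cons, ih (fsStepA sub d v) (fsContains_stepA sub d v w h)]
      rw [fsIterComm sub v w hwv (t.count w) d h]
      rw [List.count_cons_of_ne (hv : v ≠ w), List.filter_cons]
      have : (!(v == w)) = true := by simp [hv]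
      rw [if_pos this, List.foldl_cons]

theorem fsDrop (sub w : String) (hP : w ∉ pySplitSpace sub) :
    ∀ (l : List String) (d : PySem.Dict String (List String)),
      l.foldl (fsStepA sub) d = (l.filter (fun y => !(y == w))).foldl (fsStepA sub) d := by
  intro l
  induction l with
  | nil => intro d; rfl
  | cons v t ih =>
    intro d
    by_cases hv : v = w
    · subst hv
      rw [List.foldl_cons, fsStepA_eq, if_neg hP, List.filter_cons]
      simp only [beq_self_eq_true, Bool.not_true, Bool.false_eq_true, if_false]
      exact ih d
    · rw [List.foldl_cons, List.filter_cons]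
      have : (!(v == w)) = true := by simp [hv]
      rw [if_pos this, List.foldl_cons]
      exact ih (fsStepA sub d v)

theorem fsOfListFilter (x : String) :
    ∀ (xs : List String),
      PySem.Set.ofList (xs.filter (fun y => !(y == x)))
        = (PySem.Set.ofList xs).filter (fun y => !(y == x)) := by
  intro xs
  induction xs with
  | nil => rfl
  | cons y t ih =>
    by_cases hy : y = x
    · subst hy
      rw [List.filter_cons]
      simp only [beq_self_eq_true, Bool.not_true, Bool.false_eq_true, if_false]
      rw [ih, PySem.Set.ofList_cons]
      show _ = (y :: PySem.Set.discard (PySem.Set.ofList t) y).filter (fun z => !(z == y))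
      unfold PySem.Set.discard
      rw [List.filter_cons]
      simp [List.filter_filter]
    · rw [List.filter_cons]
      have hyx : (!(y == x)) = true := by simp [hy]
      rw [if_pos hyx, PySem.Set.ofList_cons, PySem.Set.ofList_cons]
      unfold PySem.Set.discard
      rw [ih]
      rw [List.filter_cons, if_pos hyx]
      congr 1
      rw [List.filter_filter, List.filter_filter]
      apply List.filter_congr
      intro z _
      rw [Bool.and_comm]

theorem fsMain (sub : String) :
    ∀ (n : Nat) (ws : List String), ws.length ≤ n → ∀ (d : PySem.Dict String (List String)),
      ws.foldl (fsStepA sub) d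
        = (PySem.Set.ofList ws).foldl
            (fun d v => if v ∈ pySplitSpace sub then fsIns sub v (ws.count v) d else d) d := by
  intro n
  induction n with
  | zero =>
    intro ws h d
    have : ws = [] := List.eq_nil_of_length_eq_zero (Nat.le_zero.mp h)
    subst this; rfl
  | succ n ih =>
    intro ws h d
    match ws with
    | [] => rfl
    | w :: rest =>
      have hlen : rest.length ≤ n := by simpa using h
      have hlen' : (rest.filter (fun y => !(y == w))).length ≤ n :=
        le_trans (List.length_filter_le _ _) hlen
      have hofl : PySem.Set.ofList (w :: rest)
          = w :: PySem.Set.ofList (rest.filter (fun y => !(y == w))) := by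
        rw [PySem.Set.ofList_cons]
        congr 1
        exact (fsOfListFilter w rest).symm
      rw [hofl, List.foldl_cons, List.foldl_cons]
      have hcongr : ∀ (D : PySem.Dict String (List String)),
          (PySem.Set.ofList (rest.filter (fun y => !(y == w)))).foldl
            (fun d v => if v ∈ pySplitSpace sub then fsIns sub v ((rest.filter (fun y => !(y == w))).count v) d else d) D
          = (PySem.Set.ofList (rest.filter (fun y => !(y == w)))).foldl
            (fun d v => if v ∈ pySplitSpace sub then fsIns sub v ((w :: rest).count v) d else d) D := by
        intro D
        apply PySem.List.foldl_congr_mem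
        intro acc v hvmem
        have hvf : v ∈ rest.filter (fun y => !(y == w)) := (PySem.Set.mem_ofList _ _).mp hvmem
        have hvw : v ≠ w := by
          have := List.of_mem_filter hvf
          simpa using this
        rw [List.count_cons_of_ne (Ne.symm hvw), List.count_filter (by simpa using hvw)]
      by_cases hP : w ∈ pySplitSpace sub
      · rw [fsStepA_eq, if_pos hP]
        have hcont : (fsIns sub w 1 d).contains w = true := by
          unfold fsIns
          rw [PySem.Dict.contains_insert]
          simp
        rw [fsPull sub w rest (fsIns sub w 1 d) hcont, fsIterIns sub w hP]
        rw [ih (rest.filter (fun y => !(y == w))) hlen' (fsIns sub w (rest.count w + 1) d)]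
        rw [hcongr]
        rw [if_pos hP, List.count_cons_self]
      · rw [fsStepA_eq, if_neg hP]
        rw [fsDrop sub w hP rest d]
        rw [ih (rest.filter (fun y => !(y == w))) hlen' d]
        rw [hcongr, if_neg hP]

-- ===== VERDICT (by name: the statement is the Claim_ definition above) =====
theorem find_subsectors_spec : Claim_equal_find_subsectors := by
  intro organizations cleaned_subsectors _
  show find_subsectors organizations cleaned_subsectors
      = find_subsectors_alt organizations cleaned_subsectors
  unfold find_subsectors find_subsectors_alt
  simp only []
  congr 1
  apply PySem.List.foldl_congr_mem
  intro acc sub _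
  show ((PySem.Dict.ofList organizations).keys.foldl
      (fun d org => (pySplitSpace org).foldl (fsStepA sub) d) acc) = _
  rw [← List.foldl_flatMap]
  rw [show ((PySem.Dict.ofList organizations).keys.foldl (fun counts org =>
        (pySplitSpace org).foldl (fun (counts : PySem.Dict String Int) w =>
          counts.insert w (counts.getD w 0 + 1)) counts) PySem.Dict.empty)
      = PySem.Dict.counter ((PySem.Dict.ofList organizations).keys.flatMap pySplitSpace) from by
    rw [← List.foldl_flatMap]
    exact PySem.Dict.foldl_insert_getD_add_one_eq_counter _]
  rw [PySem.Dict.items_counter, List.foldl_map]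
  rw [fsMain sub ((PySem.Dict.ofList organizations).keys.flatMap pySplitSpace).length _ le_rfl acc]
  apply PySem.List.foldl_congr_mem
  intro a v _
  simp only [PySem.Set.mem_ofList, Int.toNat_natCast, fsIns]
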